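-- pv_equiv track=rewrite | github.com/Noor-Nasri/daily-leetcode | 2836-neither-minimum-nor-maximum/neither-minimum-nor-maximum.py | findNonMinOrMax
-- ===== SOURCE A (Python) =====
-- from typing import List
--
-- def findNonMinOrMax(nums: List[int]) -> int:
--     minNum = nums[0]
--     maxNum = nums[0]
--     # [1] 3     --> 0
--     for num in nums:
--         if minNum < num < maxNum:
--             return num
--
--         if num < minNum:
--             if minNum != maxNum:
--                 return minNum
--
--             minNum = num
--         if num > maxNum:
--             if minNum != maxNum:
--                 return maxNum
--
--             maxNum = num
--
--     return -1
-- ===== SOURCE B (Python) =====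
-- def findNonMinOrMax(nums):
--     # A returns the median of the first three distinct values, else -1.
--     seen = []
--     for num in nums:
--         if num not in seen:
--             seen.append(num)
--             if len(seen) == 3:
--                 return sorted(seen)[1]
--     return -1
-- ===== Notes on version B (the rewrite author's own statement) =====
-- stated objective: simpler
-- what changed: B replaces A's min/max state machine with an early-return chain by collecting the first three distinct values in appearance order and returning the middle one of the sorted three, else the sentinel -1.
import Mathlib
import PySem

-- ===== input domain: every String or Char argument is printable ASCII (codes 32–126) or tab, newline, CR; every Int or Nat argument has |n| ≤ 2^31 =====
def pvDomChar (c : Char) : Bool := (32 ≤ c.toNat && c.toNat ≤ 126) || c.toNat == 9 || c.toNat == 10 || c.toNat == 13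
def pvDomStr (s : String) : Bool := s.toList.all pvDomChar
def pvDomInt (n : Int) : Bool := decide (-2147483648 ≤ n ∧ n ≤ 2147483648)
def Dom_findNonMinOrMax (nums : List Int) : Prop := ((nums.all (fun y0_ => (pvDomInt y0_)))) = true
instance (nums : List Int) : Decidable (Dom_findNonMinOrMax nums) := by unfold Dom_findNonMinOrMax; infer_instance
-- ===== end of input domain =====

-- B collects the first three distinct values and returns their median; A's min/max scan does the same.
-- ===== PORT A =====
-- the for-loop of A, carrying (minNum, maxNum); branches in A's order (the two
-- sequential 'if's of A behave as if-chained: after 'num < minNum', 'num > maxNum' is false)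
def findNonMinOrMaxLoopA (mn mx : Int) : List Int → Int
  | [] => -1
  | n :: t =>
    if mn < n ∧ n < mx then n
    else if n < mn then
      (if mn ≠ mx then mn else findNonMinOrMaxLoopA n mx t)
    else if n > mx then
      (if mn ≠ mx then mx else findNonMinOrMaxLoopA mn n t)
    else findNonMinOrMaxLoopA mn mx t

def findNonMinOrMax (nums : List Int) : Int :=
  match PySem.List.pyGet? nums 0 with    -- nums[0]; none = IndexError, excluded by Pre_
  | none => -1
  | some h => findNonMinOrMaxLoopA h h nums

-- ===== PORT B =====
-- B's loop, carrying the list 'seen' of distinct values in first-appearance order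
def findNonMinOrMaxLoopB (seen : List Int) : List Int → Int
  | [] => -1
  | n :: t =>
    if n ∈ seen then findNonMinOrMaxLoopB seen t
    else
      let s := seen ++ [n]
      if s.length = 3 then PySem.List.pyGetD (PySem.List.sorted s (fun x => x) false) 1 0
      else findNonMinOrMaxLoopB s t

def findNonMinOrMax_alt (nums : List Int) : Int := findNonMinOrMaxLoopB [] nums

-- ===== PRECONDITION & SPEC =====
-- Pre_ excludes only the empty list, on which A raises IndexError (nums[0]).
def Pre_findNonMinOrMax (nums : List Int) : Prop := nums ≠ []
instance (nums : List Int) : Decidable (Pre_findNonMinOrMax nums) := by unfold Pre_findNonMinOrMax; infer_instance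
def pvWitness_findNonMinOrMax : List Int := [1, 3, 2]

def Spec_findNonMinOrMax (nums : List Int) (out : Int) : Prop := out = findNonMinOrMax_alt nums
instance (nums : List Int) (out : Int) : Decidable (Spec_findNonMinOrMax nums out) := by unfold Spec_findNonMinOrMax; infer_instance

-- ===== CLAIM (what is proved, stated in full; the proofs are below) =====
def Claim_equal_findNonMinOrMax : Prop := ∀ (nums : List Int), Dom_findNonMinOrMax nums → Pre_findNonMinOrMax nums → Spec_findNonMinOrMax nums (findNonMinOrMax nums)

-- ===== LEMMAS AND PROOFS =====

-- median of three: sorted [x,y,c] indexed at 1 equals m when [lo,m,hi] is an ordered permutation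
lemma med3 (x y c lo m hi : Int) (hperm : ([lo, m, hi] : List Int).Perm [x, y, c])
    (h1 : lo ≤ m) (h2 : m ≤ hi) :
    PySem.List.pyGetD (PySem.List.sorted [x, y, c] (fun v => v) false) 1 0 = m := by
  have hs := PySem.List.sorted_id_eq_of_perm_of_pairwise [x, y, c] [lo, m, hi] hperm
    (by simp [List.pairwise_cons]; omega)
  rw [hs, PySem.List.pyGetD_eq_getElem _ _ (by norm_num) (by norm_num)]
  simp

-- phase 2: two distinct values seen; seen is some ordering [x,y] of {mn,mx}
lemma loop2 (mn mx x y : Int) (h : mn < mx) (hperm : ([x, y] : List Int).Perm [mn, mx]) :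
    ∀ t, findNonMinOrMaxLoopA mn mx t = findNonMinOrMaxLoopB [x, y] t := by
  intro t
  induction t with
  | nil => rfl
  | cons n t ih =>
    have hmem : n ∈ ([x, y] : List Int) ↔ n = mn ∨ n = mx := by
      rw [hperm.mem_iff]; simp
    have hp3 : ([mn, mx, n] : List Int).Perm [x, y, n] :=
      (by simpa using hperm.append_right [n] : ([x, y, n] : List Int).Perm [mn, mx, n]).symm
    simp only [findNonMinOrMaxLoopA, findNonMinOrMaxLoopB]
    by_cases hmid : mn < n ∧ n < mx
    · have hnotin : n ∉ ([x, y] : List Int) := by rw [hmem]; omega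
      simp only [if_pos hmid, if_neg hnotin]
      rw [if_pos (by simp : (([x, y] : List Int) ++ [n]).length = 3)]
      have hmed : ([mn, n, mx] : List Int).Perm [x, y, n] :=
        (List.Perm.cons mn (List.Perm.swap mx n [])).trans hp3
      rw [show ([x, y] : List Int) ++ [n] = [x, y, n] from rfl,
        med3 x y n mn n mx hmed (le_of_lt hmid.1) (le_of_lt hmid.2)]
    · by_cases hlo : n < mn
      · have hnotin : n ∉ ([x, y] : List Int) := by rw [hmem]; omega
        simp only [if_neg hmid, if_pos hlo, if_neg hnotin, if_pos (show mn ≠ mx by omega)]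
        rw [if_pos (by simp : (([x, y] : List Int) ++ [n]).length = 3)]
        have hmed : ([n, mn, mx] : List Int).Perm [x, y, n] :=
          ((List.Perm.swap mn n [mx]).trans (List.Perm.cons mn (List.Perm.swap mx n []))).trans hp3
        rw [show ([x, y] : List Int) ++ [n] = [x, y, n] from rfl,
          med3 x y n n mn mx hmed (by omega) (by omega)]
      · by_cases hhi : n > mx
        · have hnotin : n ∉ ([x, y] : List Int) := by rw [hmem]; omega
          simp only [if_neg hmid, if_neg hlo, if_pos hhi, if_neg hnotin,
            if_pos (show mn ≠ mx by omega)]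
          rw [if_pos (by simp : (([x, y] : List Int) ++ [n]).length = 3)]
          rw [show ([x, y] : List Int) ++ [n] = [x, y, n] from rfl,
            med3 x y n mn mx n hp3 (by omega) (by omega)]
        · have hin : n ∈ ([x, y] : List Int) := by rw [hmem]; omega
          simp only [if_neg hmid, if_neg hlo, if_neg hhi, if_pos hin]
          exact ih

-- phase 1: one value seen; min = max = a, seen = [a]
lemma loop1 (a : Int) : ∀ t, findNonMinOrMaxLoopA a a t = findNonMinOrMaxLoopB [a] t := by
  intro t
  induction t generalizing a with
  | nil => rfl
  | cons n t ih =>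
    simp only [findNonMinOrMaxLoopA, findNonMinOrMaxLoopB]
    by_cases hne : n = a
    · subst hne
      simp only [if_neg (by omega : ¬ (n < n ∧ n < n)), if_neg (lt_irrefl n),
        if_pos (List.mem_singleton.mpr rfl)]
      exact ih n
    · by_cases hlo : n < a
      · simp only [if_neg (by omega : ¬ (a < n ∧ n < a)), if_pos hlo,
          if_neg (by simp [hne] : n ∉ ([a] : List Int)), if_neg (by omega : ¬ (a ≠ a))]
        have hlen : ¬ (([a] : List Int) ++ [n]).length = 3 := by simp
        rw [if_neg hlen]
        exact loop2 n a a n hlo (List.Perm.swap n a []) t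
      · have hhi : n > a := by omega
        simp only [if_neg (by omega : ¬ (a < n ∧ n < a)), if_neg hlo, if_pos hhi,
          if_neg (by simp [hne] : n ∉ ([a] : List Int)), if_neg (by omega : ¬ (a ≠ a))]
        have hlen : ¬ (([a] : List Int) ++ [n]).length = 3 := by simp
        rw [if_neg hlen]
        exact loop2 a n a n hhi (List.Perm.refl _) t

-- ===== VERDICT (by name: the statement is the Claim_ definition above) =====
theorem findNonMinOrMax_spec : Claim_equal_findNonMinOrMax := by
  intro nums _ hpre
  unfold Spec_findNonMinOrMax findNonMinOrMax findNonMinOrMax_alt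
  match nums with
  | [] => exact absurd rfl hpre
  | h :: t =>
    rw [PySem.List.pyGet?_zero_cons]
    simp only [findNonMinOrMaxLoopA, findNonMinOrMaxLoopB,
      if_neg (by omega : ¬ (h < h ∧ h < h)), if_neg (lt_irrefl h),
      if_neg (List.not_mem_nil), if_neg (by simp : ¬ (([] : List Int) ++ [h]).length = 3)]
    simpa using loop1 h t
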